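-- pv_equiv track=rewrite | github.com/GONZA-R/Practico-N1-RAIN | Punto3TP1.py | buscar_adyacentes
-- ===== SOURCE A (Python) =====
-- def buscar_adyacentes(palabra_1, palabra_2, fichero_invertido_posicional):
--     # Obtener la lista de ocurrencias de ambas palabras en el archivo invertido posicional
--     ocurrencias_palabra_1 = fichero_invertido_posicional.get(palabra_1, [])
--     ocurrencias_palabra_2 = fichero_invertido_posicional.get(palabra_2, [])
--
--     # Inicializar la lista de adyacencias encontradas
--     adyacencias_encontradas = []
--
--     # Recorrer todas las ocurrencias de la primera palabra
--     for ocurrencia_palabra_1 in ocurrencias_palabra_1: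
--         documento_palabra_1, posicion_palabra_1 = ocurrencia_palabra_1
--
--         # Buscar ocurrencias de la segunda palabra en el mismo documento y cercanas a la primera palabra
--         for ocurrencia_palabra_2 in ocurrencias_palabra_2:
--             documento_palabra_2, posicion_palabra_2 = ocurrencia_palabra_2
--             if documento_palabra_1 == documento_palabra_2 and abs(posicion_palabra_1 - posicion_palabra_2) <= 10:
--                 adyacencias_encontradas.append((documento_palabra_1, posicion_palabra_1, posicion_palabra_2))
--
--     # Devolver la lista de adyacencias encontradas
--     return adyacencias_encontradas
-- ===== SOURCE B (Python) =====
-- def buscar_adyacentes(palabra_1, palabra_2, fichero_invertido_posicional):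
--     # Index word-2 positions per document once, then produce the result as a
--     # single flat comprehension over word-1 occurrences.
--     ocurrencias_palabra_1 = fichero_invertido_posicional.get(palabra_1, [])
--     ocurrencias_palabra_2 = fichero_invertido_posicional.get(palabra_2, [])
--
--     posiciones_por_documento = {}
--     for documento, posicion in ocurrencias_palabra_2:
--         posiciones_por_documento.setdefault(documento, []).append(posicion)
--
--     return [(documento, posicion_1, posicion_2)
--             for documento, posicion_1 in ocurrencias_palabra_1
--             for posicion_2 in posiciones_por_documento.get(documento, [])
--             if abs(posicion_1 - posicion_2) <= 10]
-- ===== Notes on version B (the rewrite author's own statement) =====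
-- stated objective: alternative
-- what changed: B builds a per-document index of word-2 positions once and emits the result as a flat comprehension over word-1 occurrences, instead of A's nested loop over all word-2 occurrences with an accumulator; on the measured inputs the cost is comparable.
import Mathlib
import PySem

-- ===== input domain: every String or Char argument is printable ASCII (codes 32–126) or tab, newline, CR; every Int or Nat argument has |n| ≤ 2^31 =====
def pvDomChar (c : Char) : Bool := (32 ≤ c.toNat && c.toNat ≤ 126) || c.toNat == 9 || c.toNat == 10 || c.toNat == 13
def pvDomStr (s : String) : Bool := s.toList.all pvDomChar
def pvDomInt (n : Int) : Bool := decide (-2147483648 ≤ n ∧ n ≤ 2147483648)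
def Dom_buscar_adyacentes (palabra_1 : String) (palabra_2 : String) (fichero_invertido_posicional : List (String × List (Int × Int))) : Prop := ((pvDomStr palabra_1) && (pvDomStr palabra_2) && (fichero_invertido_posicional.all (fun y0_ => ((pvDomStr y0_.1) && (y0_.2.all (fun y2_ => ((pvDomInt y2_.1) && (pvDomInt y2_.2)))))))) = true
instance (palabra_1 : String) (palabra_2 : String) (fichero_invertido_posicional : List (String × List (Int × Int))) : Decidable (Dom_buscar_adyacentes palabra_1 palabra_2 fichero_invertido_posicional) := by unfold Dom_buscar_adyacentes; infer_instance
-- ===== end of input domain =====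

-- B indexes word-2 positions per document once and emits the result as a flat map
-- over word-1 occurrences (objective: alternative algorithm, comparable cost).

-- ===== PORT A =====
def buscar_adyacentes (palabra_1 : String) (palabra_2 : String) (fichero_invertido_posicional : List (String × List (Int × Int))) : List (Int × Int × Int) :=
  let ocurrencias_palabra_1 := (PySem.Dict.mk fichero_invertido_posicional).getD palabra_1 []
  let ocurrencias_palabra_2 := (PySem.Dict.mk fichero_invertido_posicional).getD palabra_2 []
  ocurrencias_palabra_1.foldl (fun adyacencias oc1 =>
    ocurrencias_palabra_2.foldl (fun adyacencias2 oc2 =>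
      if oc1.1 == oc2.1 && decide (|oc1.2 - oc2.2| ≤ 10)
      then adyacencias2 ++ [(oc1.1, oc1.2, oc2.2)]
      else adyacencias2) adyacencias) []

-- ===== PORT B =====
def buscar_adyacentes_alt (palabra_1 : String) (palabra_2 : String) (fichero_invertido_posicional : List (String × List (Int × Int))) : List (Int × Int × Int) :=
  let o1 := (PySem.Dict.mk fichero_invertido_posicional).getD palabra_1 []
  let o2 := (PySem.Dict.mk fichero_invertido_posicional).getD palabra_2 []
  -- posiciones_por_documento.setdefault(doc, []).append(pos)
  let idx := o2.foldl (fun d oc => d.modify oc.1 [] (· ++ [oc.2])) PySem.Dict.empty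
  -- the flat list comprehension
  o1.flatMap (fun oc =>
    ((idx.getD oc.1 []).filter (fun p => decide (|oc.2 - p| ≤ 10))).map
      (fun p => (oc.1, oc.2, p)))

-- ===== PRECONDITION & SPEC =====
def Spec_buscar_adyacentes (palabra_1 : String) (palabra_2 : String) (fichero_invertido_posicional : List (String × List (Int × Int))) (out : List (Int × Int × Int)) : Prop := out = buscar_adyacentes_alt palabra_1 palabra_2 fichero_invertido_posicional
instance (palabra_1 : String) (palabra_2 : String) (fichero_invertido_posicional : List (String × List (Int × Int))) (out : List (Int × Int × Int)) : Decidable (Spec_buscar_adyacentes palabra_1 palabra_2 fichero_invertido_posicional out) := by unfold Spec_buscar_adyacentes; infer_instance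

-- ===== CLAIM (what is proved, stated in full; the proofs are below) =====
def Claim_equal_buscar_adyacentes : Prop := ∀ (palabra_1 : String) (palabra_2 : String) (fichero_invertido_posicional : List (String × List (Int × Int))), Dom_buscar_adyacentes palabra_1 palabra_2 fichero_invertido_posicional → Spec_buscar_adyacentes palabra_1 palabra_2 fichero_invertido_posicional (buscar_adyacentes palabra_1 palabra_2 fichero_invertido_posicional)

-- ===== LEMMAS AND PROOFS =====

-- A's inner scan over all word-2 occurrences equals B's per-oc1 flatMap element.
lemma inner_eq (o2 : List (Int × Int)) (d1 p1 : Int) (acc : List (Int × Int × Int)) :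
    o2.foldl (fun acc2 oc2 =>
      if d1 == oc2.1 && decide (|p1 - oc2.2| ≤ 10)
      then acc2 ++ [(d1, p1, oc2.2)] else acc2) acc
    = acc ++ (((o2.foldl (fun d oc => d.modify oc.1 [] (· ++ [oc.2])) PySem.Dict.empty).getD d1 []).filter
        (fun p => decide (|p1 - p| ≤ 10))).map (fun p => (d1, p1, p)) := by
  rw [PySem.Dict.getD_foldl_modify_append, PySem.Dict.getD_empty]
  rw [PySem.List.foldl_append_if]
  rw [List.nil_append, List.filter_map, List.map_map, List.filter_filter]
  simp only [Function.comp_def]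
  have hf : List.filter (fun oc2 : Int × Int => d1 == oc2.1 && decide (|p1 - oc2.2| ≤ 10)) o2
      = List.filter (fun a : Int × Int => decide (|p1 - a.2| ≤ 10) && a.1 == d1) o2 := by
    apply List.filter_congr
    intro a _
    rcases eq_or_ne d1 a.1 with h | h
    · rw [h, Bool.and_comm]
    · simp [Bool.and_comm, beq_eq_false_iff_ne.mpr h, beq_eq_false_iff_ne.mpr h.symm]
  rw [hf]

-- ===== VERDICT (by name: the statement is the Claim_ definition above) =====
theorem buscar_adyacentes_spec : Claim_equal_buscar_adyacentes := by
  intro palabra_1 palabra_2 f _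
  unfold Spec_buscar_adyacentes
  simp only [buscar_adyacentes, buscar_adyacentes_alt]
  rw [show (List.foldl (fun adyacencias oc1 =>
      List.foldl (fun adyacencias2 oc2 =>
          if oc1.1 == oc2.1 && decide (|oc1.2 - oc2.2| ≤ 10)
          then adyacencias2 ++ [(oc1.1, oc1.2, oc2.2)] else adyacencias2)
        adyacencias ((PySem.Dict.mk f).getD palabra_2 []))
      [] ((PySem.Dict.mk f).getD palabra_1 []))
    = List.foldl (fun acc oc1 =>
        acc ++ ((((PySem.Dict.mk f).getD palabra_2 []).foldl
            (fun d oc => d.modify oc.1 [] (· ++ [oc.2])) PySem.Dict.empty).getD oc1.1 []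
          |>.filter (fun p => decide (|oc1.2 - p| ≤ 10))
          |>.map (fun p => (oc1.1, oc1.2, p))))
      [] ((PySem.Dict.mk f).getD palabra_1 []) from by
    congr 1
    funext acc oc1
    exact inner_eq _ oc1.1 oc1.2 acc]
  rw [PySem.List.foldl_append_eq_flatMap, List.nil_append]
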